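-- pv_equiv track=rewrite | github.com/pypi-data/pypi-mirror-399 | packages/protobunny/protobunny-0.1.2a2-py3-none-any.whl/scripts/post_compile.py | ensure_message_mixin
-- ===== SOURCE A (Python) =====
-- def ensure_message_mixin(source: str) -> str:
--     new_source = source.replace("(betterproto.Message):", "(models.ProtoBunnyMessage):")
--     lines = new_source.split('\n')
--
--     for i, line in enumerate(lines):
--         if 'import betterproto' in line:
--             # Insert after this line
--             lines.insert(i + 1, "from protobunny import models as models")
--             break
--
--     return '\n'.join(lines)
-- ===== SOURCE B (Python) =====
-- def ensure_message_mixin(source: str) -> str: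
--     new_source = source.replace("(betterproto.Message):", "(models.ProtoBunnyMessage):")
--
--     def add_import(lines):
--         # rebuild the list recursively; splice the import line in right
--         # after the first line mentioning 'import betterproto'
--         if not lines:
--             return []
--         first, rest = lines[0], lines[1:]
--         if 'import betterproto' in first:
--             return [first, "from protobunny import models as models"] + rest
--         return [first] + add_import(rest)
--
--     return '\n'.join(add_import(new_source.split('\n')))
-- ===== Notes on version B (the rewrite author's own statement) =====
-- stated objective: alternative
-- what changed: replaces the enumerate loop that mutates the line list in place via list.insert and break with a pure structural recursion that rebuilds the line list, splicing the import line after the first match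
import Mathlib
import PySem

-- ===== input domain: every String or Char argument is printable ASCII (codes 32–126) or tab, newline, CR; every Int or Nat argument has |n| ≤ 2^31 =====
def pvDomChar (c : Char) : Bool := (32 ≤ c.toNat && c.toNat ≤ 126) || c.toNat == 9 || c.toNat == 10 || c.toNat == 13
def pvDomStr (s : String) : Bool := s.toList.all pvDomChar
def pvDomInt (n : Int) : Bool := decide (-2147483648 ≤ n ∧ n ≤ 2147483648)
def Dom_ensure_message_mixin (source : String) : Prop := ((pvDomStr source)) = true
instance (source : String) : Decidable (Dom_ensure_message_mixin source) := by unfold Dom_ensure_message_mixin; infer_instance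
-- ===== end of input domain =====

-- B replaces A's enumerate loop (in-place list.insert + break) with a pure recursion
-- that rebuilds the line list; same return value, no speed claim.

-- ===== PORT A =====
-- A's for-loop over enumerate(lines) with in-place insert and break
def pvEmLoop (pairs : List (Int × List Char)) (lines : List (List Char)) : List (List Char) :=
  match pairs with
  | [] => lines
  | (i, line) :: rest =>
    if PySem.Chars.isIn "import betterproto".toList line then
      PySem.List.insert lines (i + 1) "from protobunny import models as models".toList
    else pvEmLoop rest lines

def ensure_message_mixin (source : String) : String :=
  let new_source := PySem.Chars.replace source.toList "(betterproto.Message):".toList "(models.ProtoBunnyMessage):".toList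
  let lines := PySem.Chars.splitOn new_source ['\n']
  String.ofList (PySem.Chars.join ['\n'] (pvEmLoop (PySem.List.enumerate lines 0) lines))

-- ===== PORT B =====
-- B's recursive helper add_import
def pvAddImport (lines : List (List Char)) : List (List Char) :=
  match lines with
  | [] => []
  | first :: rest =>
    if PySem.Chars.isIn "import betterproto".toList first then
      first :: "from protobunny import models as models".toList :: rest
    else first :: pvAddImport rest

def ensure_message_mixin_alt (source : String) : String :=
  let new_source := PySem.Chars.replace source.toList "(betterproto.Message):".toList "(models.ProtoBunnyMessage):".toList
  String.ofList (PySem.Chars.join ['\n'] (pvAddImport (PySem.Chars.splitOn new_source ['\n'])))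

-- ===== PRECONDITION & SPEC =====
def Spec_ensure_message_mixin (source : String) (out : String) : Prop := out = ensure_message_mixin_alt source
instance (source : String) (out : String) : Decidable (Spec_ensure_message_mixin source out) := by unfold Spec_ensure_message_mixin; infer_instance

-- ===== CLAIM (what is proved, stated in full; the proofs are below) =====
def Claim_equal_ensure_message_mixin : Prop := ∀ (source : String), Dom_ensure_message_mixin source → Spec_ensure_message_mixin source (ensure_message_mixin source)

-- ===== LEMMAS AND PROOFS =====

-- Loop invariant: with a prefix `pre` of already-scanned non-matching lines,
-- A's loop over the enumeration of the remaining lines equals B's recursion.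
lemma pvEmLoop_eq (cur : List (List Char)) (pre : List (List Char))
    (hpre : ∀ l ∈ pre, PySem.Chars.isIn "import betterproto".toList l = false) :
    pvEmLoop (PySem.List.enumerate cur (pre.length : Int)) (pre ++ cur) = pre ++ pvAddImport cur := by
  induction cur generalizing pre with
  | nil => simp [PySem.List.enumerate, pvEmLoop, pvAddImport]
  | cons l rest ih =>
    rw [PySem.List.enumerate.eq_2]
    by_cases h : PySem.Chars.isIn "import betterproto".toList l = true
    · simp only [pvEmLoop, pvAddImport, h, if_pos]
      have hcast : (pre.length : Int) + 1 = ((pre.length + 1 : Nat) : Int) := by push_cast; ring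
      have hle : pre.length + 1 ≤ (pre ++ l :: rest).length := by simp
      rw [hcast, PySem.List.insert_natCast _ _ _ hle]
      have hsplit : pre ++ l :: rest = (pre ++ [l]) ++ rest := by simp
      rw [hsplit, List.take_left' (by simp), List.drop_left' (by simp)]
      simp
    · have h' : PySem.Chars.isIn "import betterproto".toList l = false := by
        simpa using h
      simp only [pvEmLoop, pvAddImport, h', Bool.false_eq_true, if_false]
      have hpre' : ∀ x ∈ pre ++ [l], PySem.Chars.isIn "import betterproto".toList x = false := by
        intro x hx
        rcases List.mem_append.mp hx with hx | hx
        · exact hpre x hx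
        · simp at hx; subst hx; exact h'
      have hih := ih (pre ++ [l]) hpre'
      simpa [List.append_assoc, add_comm] using hih

-- ===== VERDICT (by name: the statement is the Claim_ definition above) =====
theorem ensure_message_mixin_spec : Claim_equal_ensure_message_mixin := by
  intro source _
  unfold Spec_ensure_message_mixin ensure_message_mixin ensure_message_mixin_alt
  have h : pvEmLoop (PySem.List.enumerate (PySem.Chars.splitOn
      (PySem.Chars.replace source.toList "(betterproto.Message):".toList "(models.ProtoBunnyMessage):".toList)
      ['\n']) 0) (PySem.Chars.splitOn
      (PySem.Chars.replace source.toList "(betterproto.Message):".toList "(models.ProtoBunnyMessage):".toList)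
      ['\n']) = pvAddImport (PySem.Chars.splitOn
      (PySem.Chars.replace source.toList "(betterproto.Message):".toList "(models.ProtoBunnyMessage):".toList)
      ['\n']) := by
    simpa using pvEmLoop_eq _ [] (by intro l hl; simp at hl)
  simp only [h]
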